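-- pv_equiv track=rewrite | github.com/python-packaging/metadata-please | metadata_please/types.py | convert_sdist_requires
-- ===== SOURCE A (Python) =====
-- def convert_sdist_requires(data: str) -> tuple[tuple[str, ...], frozenset[str]]:
--     # This is reverse engineered from looking at a couple examples, but there
--     # does not appear to be a formal spec.  Mentioned at
--     # https://setuptools.readthedocs.io/en/latest/formats.html#requires-txt
--     # This snippet has existed in `honesty` for a couple of years now.
--     current_markers = None
--     extras: set[str] = set()
--     lst: list[str] = []
--     for line in data.splitlines():
--         line = line.strip()
--         if not line:
--             continue
--         elif line[:1] == "[" and line[-1:] == "]":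
--             current_markers = line[1:-1]
--             if ":" in current_markers:
--                 # absl-py==0.9.0 and requests==2.22.0 are good examples of this
--                 extra, markers = current_markers.split(":", 1)
--                 if extra:
--                     extras.add(extra)
--                     current_markers = f"({markers}) and extra == {extra!r}"
--                 else:
--                     current_markers = markers
--             else:
--                 # this is an extras_require
--                 extras.add(current_markers)
--                 current_markers = f"extra == {current_markers!r}"
--         else:
--             if current_markers:
--                 lst.append(f"{line}; {current_markers}")
--             else:
--                 lst.append(line)
--     return tuple(lst), frozenset(extras)
-- ===== SOURCE B (Python) =====
-- # Two-phase re-implementation: group stripped non-empty lines into sections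
-- # (leading headerless group + one group per [...] header) by structural
-- # recursion, then flatten each section with its marker in a second pass.
-- def _split_sections(lines):
--     # returns (leading requirement lines, [(header content, body lines), ...])
--     if not lines:
--         return [], []
--     first, rest = lines[0], lines[1:]
--     body, sections = _split_sections(rest)
--     if first.startswith("[") and first.endswith("]"):
--         return [], [(first[1:-1], body)] + sections
--     return [first] + body, sections
--
--
-- def _marker(header, extras):
--     # compute the PEP 508 marker string for a section header; records extras
--     if ":" in header:
--         extra, markers = header.split(":", 1)
--         if extra:
--             extras.add(extra)
--             return f"({markers}) and extra == {extra!r}"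
--         return markers
--     extras.add(header)
--     return f"extra == {header!r}"
--
--
-- def convert_sdist_requires(data: str) -> tuple[tuple[str, ...], frozenset[str]]:
--     lines = [s for s in (ln.strip() for ln in data.splitlines()) if s]
--     lead, sections = _split_sections(lines)
--     extras: set[str] = set()
--     out = list(lead)
--     for header, body in sections:
--         m = _marker(header, extras)
--         out.extend(f"{r}; {m}" if m else r for r in body)
--     return tuple(out), frozenset(extras)
-- ===== Notes on version B (the rewrite author's own statement) =====
-- stated objective: alternative
-- what changed: B replaces A's single fold with a mutable current-marker state by a two-phase decomposition: recursively partition the stripped non-empty lines into a leading group and per-header sections, then flatten each section with its marker computed once.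
import Mathlib
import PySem

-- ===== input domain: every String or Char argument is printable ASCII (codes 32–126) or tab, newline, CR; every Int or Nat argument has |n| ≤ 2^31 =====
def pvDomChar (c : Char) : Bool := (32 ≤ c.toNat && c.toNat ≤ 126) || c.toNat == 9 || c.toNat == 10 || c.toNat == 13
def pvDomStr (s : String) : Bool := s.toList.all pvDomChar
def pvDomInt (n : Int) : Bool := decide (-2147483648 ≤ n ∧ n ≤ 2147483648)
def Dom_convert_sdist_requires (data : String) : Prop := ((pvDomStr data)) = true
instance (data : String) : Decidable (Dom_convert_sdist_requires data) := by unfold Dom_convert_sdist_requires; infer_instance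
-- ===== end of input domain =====

-- B is an equal-cost two-phase decomposition (group lines into sections, then flatten) of A's
-- single stateful loop; equivalence of the return values is proved for every input string.

-- Python's repr(s) for a string (shared built-in helper, used by both ports);
-- exact for strings whose characters are printable ASCII, tab, newline or CR (all of Dom).
def pvReprChars (cs : List Char) : List Char :=
  let q : Char := if cs.contains '\'' && !(cs.contains '"') then '"' else '\''
  q :: cs.flatMap (fun c =>
    if c = '\\' then ['\\', '\\']
    else if c = q then ['\\', q]
    else if c = '\t' then ['\\', 't']
    else if c = '\n' then ['\\', 'n']
    else if c = '\r' then ['\\', 'r']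
    else [c]) ++ [q]

-- ===== PORT A =====
-- loop body of A: state is (current_markers, extras, lst); current_markers = [] plays None's
-- role (Python tests only its truthiness, and '' and None are equally falsy there).
-- `extra, markers = current_markers.split(":", 1)` is ported as headD projections of the split:
-- with ":" in current_markers the split has exactly two pieces, so this is that unpacking.
def pvStepA (st : List Char × PySem.Set (List Char) × List (List Char)) (raw : String) :
    List Char × PySem.Set (List Char) × List (List Char) :=
  let line := PySem.Chars.strip raw.toList
  if line = [] then st
  else if PySem.List.slice line none (some 1) = ['['] ∧ PySem.List.slice line (some (-1)) none = [']'] then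
    let cm := PySem.List.slice line (some 1) (some (-1))
    if PySem.Chars.isIn [':'] cm then
      let parts := PySem.Chars.splitOnMax cm [':'] 1
      let extra := parts.headD []
      let markers := parts.tail.headD []
      if extra ≠ [] then
        ('(' :: markers ++ ") and extra == ".toList ++ pvReprChars extra,
         PySem.Set.add st.2.1 extra, st.2.2)
      else (markers, st.2.1, st.2.2)
    else ("extra == ".toList ++ pvReprChars cm, PySem.Set.add st.2.1 cm, st.2.2)
  else
    if st.1 ≠ [] then (st.1, st.2.1, st.2.2 ++ [line ++ ';' :: ' ' :: st.1])
    else (st.1, st.2.1, st.2.2 ++ [line])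

def convert_sdist_requires (data : String) : List String × List String :=
  let st := (PySem.Str.splitlines data).foldl pvStepA ([], PySem.Set.empty, [])
  (st.2.2.map String.ofList, st.2.1.map String.ofList)

-- ===== PORT B =====
def pvIsHeader (l : List Char) : Bool :=
  PySem.Chars.startswith l ['['] && PySem.Chars.endswith l [']']

-- B's _split_sections: (leading requirement lines, [(header content, body lines), ...])
def pvSplitSections : List (List Char) → List (List Char) × List (List Char × List (List Char))
  | [] => ([], [])
  | first :: rest =>
    let (body, sections) := pvSplitSections rest
    if pvIsHeader first then ([], (PySem.List.slice first (some 1) (some (-1)), body) :: sections)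
    else (first :: body, sections)

-- B's _marker (extras.add mutation returned as the first component);
-- the split(":", 1) unpacking is ported by headD projections as in A.
def pvMarker (header : List Char) (extras : PySem.Set (List Char)) :
    PySem.Set (List Char) × List Char :=
  if PySem.Chars.isIn [':'] header then
    let parts := PySem.Chars.splitOnMax header [':'] 1
    let extra := parts.headD []
    let markers := parts.tail.headD []
    if extra ≠ [] then
      (PySem.Set.add extras extra, '(' :: markers ++ ") and extra == ".toList ++ pvReprChars extra)
    else (extras, markers)
  else (PySem.Set.add extras header, "extra == ".toList ++ pvReprChars header)

def pvTag (m : List Char) (r : List Char) : List Char :=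
  if m ≠ [] then r ++ ';' :: ' ' :: m else r

def pvStepB (acc : PySem.Set (List Char) × List (List Char))
    (sec : List Char × List (List Char)) : PySem.Set (List Char) × List (List Char) :=
  let (extras', m) := pvMarker sec.1 acc.1
  (extras', acc.2 ++ sec.2.map (pvTag m))

def convert_sdist_requires_alt (data : String) : List String × List String :=
  let lines := ((PySem.Str.splitlines data).map (fun l => PySem.Chars.strip l.toList)).filter (· ≠ [])
  let (lead, sections) := pvSplitSections lines
  let st := sections.foldl pvStepB (PySem.Set.empty, lead)
  (st.2.map String.ofList, st.1.map String.ofList)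

-- ===== PRECONDITION & SPEC =====
def Spec_convert_sdist_requires (data : String) (out : List String × List String) : Prop := out = convert_sdist_requires_alt data
instance (data : String) (out : List String × List String) : Decidable (Spec_convert_sdist_requires data out) := by unfold Spec_convert_sdist_requires; infer_instance

-- ===== CLAIM (what is proved, stated in full; the proofs are below) =====
def Claim_equal_convert_sdist_requires : Prop := ∀ (data : String), Dom_convert_sdist_requires data → Spec_convert_sdist_requires data (convert_sdist_requires data)

-- ===== LEMMAS AND PROOFS =====

-- A's body after the strip/skip prelude, on an already stripped non-empty line
def pvCoreA (st : List Char × PySem.Set (List Char) × List (List Char)) (line : List Char) :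
    List Char × PySem.Set (List Char) × List (List Char) :=
  if PySem.List.slice line none (some 1) = ['['] ∧ PySem.List.slice line (some (-1)) none = [']'] then
    let cm := PySem.List.slice line (some 1) (some (-1))
    if PySem.Chars.isIn [':'] cm then
      let parts := PySem.Chars.splitOnMax cm [':'] 1
      let extra := parts.headD []
      let markers := parts.tail.headD []
      if extra ≠ [] then
        ('(' :: markers ++ ") and extra == ".toList ++ pvReprChars extra,
         PySem.Set.add st.2.1 extra, st.2.2)
      else (markers, st.2.1, st.2.2)
    else ("extra == ".toList ++ pvReprChars cm, PySem.Set.add st.2.1 cm, st.2.2)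
  else
    if st.1 ≠ [] then (st.1, st.2.1, st.2.2 ++ [line ++ ';' :: ' ' :: st.1])
    else (st.1, st.2.1, st.2.2 ++ [line])

lemma stepA_decomp (st : List Char × PySem.Set (List Char) × List (List Char)) (raw : String) :
    pvStepA st raw =
      (fun st l => if l = [] then st else pvCoreA st l) st (PySem.Chars.strip raw.toList) := rfl


lemma headerCond_iff (l : List Char) (h : l ≠ []) :
    (PySem.List.slice l none (some 1) = ['['] ∧ PySem.List.slice l (some (-1)) none = [']'])
      ↔ pvIsHeader l = true := by
  simp [pysem, pvIsHeader]
  obtain ⟨t, a, rfl⟩ := (List.eq_nil_or_concat l).resolve_left h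
  simp only [List.concat_eq_append]
  have hdrop : List.drop ((t ++ [a]).length - 1) (t ++ [a]) = [a] := by
    simp
  rw [hdrop]
  constructor
  · rintro ⟨h1, h2⟩
    simp at h2
    refine ⟨?_, by simp [h2]⟩
    cases t with
    | nil => simp_all
    | cons b t' => simp at h1 ⊢; simp [h1]
  · rintro ⟨h1, h2⟩
    have h2' : a = ']' := by
      rcases h2 with ⟨s, hs⟩
      have := congrArg List.getLast? hs
      exact (by simpa using this : ']' = a).symm
    refine ⟨?_, by simp [h2']⟩
    cases t with
    | nil =>
      rcases h1 with ⟨s, hs⟩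
      simp at hs
      simp [← hs.1]
    | cons b t' =>
      rcases h1 with ⟨s, hs⟩
      simp at hs ⊢
      simp [← hs.1]

lemma coreA_header (cm : List Char) (extras : PySem.Set (List Char)) (lst : List (List Char))
    (l : List Char)
    (hc : PySem.List.slice l none (some 1) = ['['] ∧ PySem.List.slice l (some (-1)) none = [']']) :
    pvCoreA (cm, extras, lst) l =
      ((pvMarker (PySem.List.slice l (some 1) (some (-1))) extras).2,
       (pvMarker (PySem.List.slice l (some 1) (some (-1))) extras).1, lst) := by
  simp only [pvCoreA, pvMarker, if_pos hc]
  split_ifs <;> rfl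

lemma coreA_plain (cm : List Char) (extras : PySem.Set (List Char)) (lst : List (List Char))
    (l : List Char)
    (hc : ¬ (PySem.List.slice l none (some 1) = ['['] ∧ PySem.List.slice l (some (-1)) none = [']'])) :
    pvCoreA (cm, extras, lst) l = (cm, extras, lst ++ [pvTag cm l]) := by
  simp only [pvCoreA, pvTag, if_neg hc]
  split_ifs <;> rfl

-- the core invariant: A's remaining loop equals B's section grouping + flattening
lemma core (lines : List (List Char)) : ∀ (cm : List Char) (extras : PySem.Set (List Char))
    (lst : List (List Char)), (∀ l ∈ lines, l ≠ []) →
    (fun st => (st.2.1, st.2.2)) (lines.foldl pvCoreA (cm, extras, lst)) =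
      (pvSplitSections lines).2.foldl pvStepB
        (extras, lst ++ (pvSplitSections lines).1.map (pvTag cm)) := by
  induction lines with
  | nil => intro cm extras lst _; simp [pvSplitSections]
  | cons l rest ih =>
    intro cm extras lst hne
    have hl : l ≠ [] := hne l (List.mem_cons_self ..)
    have hrest : ∀ x ∈ rest, x ≠ [] := fun x hx => hne x (List.mem_cons_of_mem _ hx)
    rcases hps : pvSplitSections rest with ⟨body, secs⟩
    by_cases hh : pvIsHeader l = true
    · have hc := (headerCond_iff l hl).mpr hh
      simp only [List.foldl_cons, coreA_header cm extras lst l hc]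
      simp only [pvSplitSections, hps, hh, if_pos, List.map_nil, List.append_nil]
      rw [List.foldl_cons]
      have hstep : pvStepB (extras, lst) (PySem.List.slice l (some 1) (some (-1)), body) =
          ((pvMarker (PySem.List.slice l (some 1) (some (-1))) extras).1,
           lst ++ body.map (pvTag (pvMarker (PySem.List.slice l (some 1) (some (-1))) extras).2)) := by
        simp [pvStepB]
      rw [hstep]
      have := ih (pvMarker (PySem.List.slice l (some 1) (some (-1))) extras).2
        (pvMarker (PySem.List.slice l (some 1) (some (-1))) extras).1 lst hrest
      rw [hps] at this
      exact this
    · have hc : ¬ (PySem.List.slice l none (some 1) = ['['] ∧ PySem.List.slice l (some (-1)) none = [']']) := by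
        intro hcc; exact hh ((headerCond_iff l hl).mp hcc)
      simp only [List.foldl_cons, coreA_plain cm extras lst l hc]
      simp only [pvSplitSections, hps, hh]
      have := ih cm extras (lst ++ [pvTag cm l]) hrest
      rw [hps] at this
      simpa [List.append_assoc] using this

-- ===== VERDICT (by name: the statement is the Claim_ definition above) =====
theorem convert_sdist_requires_spec : Claim_equal_convert_sdist_requires := by
  intro data _
  unfold Spec_convert_sdist_requires convert_sdist_requires convert_sdist_requires_alt
  have hfold : (PySem.Str.splitlines data).foldl pvStepA ([], PySem.Set.empty, []) =
      (((PySem.Str.splitlines data).map (fun l => PySem.Chars.strip l.toList)).filter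
        (fun l => decide (l ≠ []))).foldl pvCoreA ([], PySem.Set.empty, []) := by
    rw [← PySem.List.foldl_ite_eq_foldl_filter (p := fun l => l ≠ []) pvCoreA, List.foldl_map]
    refine PySem.List.foldl_congr_mem _ _ _ _ (fun st raw _ => ?_)
    rw [stepA_decomp]
    by_cases he : PySem.Chars.strip raw.toList = [] <;> simp [he]
  rw [hfold]
  rcases hps : pvSplitSections
      (((PySem.Str.splitlines data).map (fun l => PySem.Chars.strip l.toList)).filter
        (fun l => decide (l ≠ []))) with ⟨lead, secs⟩
  have hne : ∀ l ∈ (((PySem.Str.splitlines data).map (fun l => PySem.Chars.strip l.toList)).filter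
      (fun l => decide (l ≠ []))), l ≠ [] := by
    intro l hl
    simpa using (List.mem_filter.mp hl).2
  have hcore := core _ [] PySem.Set.empty [] hne
  rw [hps] at hcore
  have htag : lead.map (pvTag []) = lead := by
    have hid : pvTag [] = id := by funext r; simp [pvTag]
    rw [hid, List.map_id]
  rw [htag] at hcore
  simp only [List.nil_append] at hcore
  have h1 := congrArg Prod.fst hcore
  have h2 := congrArg Prod.snd hcore
  simp only at h1 h2
  dsimp only
  rw [hps, h1, h2]
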